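-- pv_equiv track=rewrite | github.com/Sammyalhashe/GUI_for_Internship | LongestQuasi.py | solution
-- ===== SOURCE A (Python) =====
-- def get_amp(array):
--     """returns amplitude of sorted array
--
--     [Amplitude of an array is its largest element minus its smallest one]
--
--     Arguments:
--         array {[type]} -- [description]
--
--     Returns:
--         number -- amplitude of the array (which is already sorted)
--                   amplitude of an empty array is 0
--     """
--     if(array == []):
--         return 0
--     else:
--         return (array[-1] - array[0])
--
-- def isQuasi(array):
--     """helper function to see if sorted array is quasi constant
--
--     [helper function to see if sorted array is quasi constant]
--
--     Arguments:
--         array {[int]} -- [sorted integer array]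
--
--     Returns:
--         bool -- [True if sorted array is Quasi constant]
--     """
--     if(get_amp(array) < 2):
--         return True
--     return False
--
-- def solution(A):
--     # write your code in Python 2.7
--     pass
--
--     # sort the array
--     sorted_array = sorted(A)
--
--     # simples cases where the original sorted array is already quasi-constant
--     if(isQuasi(sorted_array)):
--         return len(sorted_array)
--     elif(len(sorted_array) == 0):
--         return 0
--     elif(len(sorted_array) == 1):
--         return 1
--     elif(len(sorted_array) == 2):
--         if(isQuasi(sorted_array)):
--             return 2
--
--     # starting quasi length for testing: default is 1 if sorted_array isn't
--     # empty
--     longest_length = 1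
--
--     i = 1
--     j = 0
--     while (i < len(sorted_array) + 1 and j <= i):
--         if(i - j >= 1):
--             if(isQuasi(sorted_array[j:i])):
--                 if(len(sorted_array[j:i]) > longest_length):
--                     longest_length = len(sorted_array[j:i])
--                 # Extend:
--                 i += 1
--             else:
--                 # De-Extend:
--                 j += 1
--         else:  # for indexing purposes
--             # if(1 > longest_length): #shouldn't ever happen; just extend
--             #    longest_length = 1
--             # Extend:
--             i += 1
--
--     # return the longest length:
--     return longest_length
-- ===== SOURCE B (Python) =====
-- def solution(A):
--     # Value-counting instead of sorting/windows: a quasi-constant (max-min < 2)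
--     # set of ints only holds values v and v+1, so the answer is the largest
--     # count(v) + count(v+1) over the distinct values v of A.  O(n), no sort.
--     counts = {}
--     for x in A:
--         counts[x] = counts.get(x, 0) + 1
--     best = 0
--     for v, c in counts.items():
--         t = c + counts.get(v + 1, 0)
--         if t > best:
--             best = t
--     return best
-- ===== Notes on version B (the rewrite author's own statement) =====
-- stated objective: faster
-- what changed: Replaces A's sort + window scan over slices with pure value counting: build a counter dict in one pass and return the largest count(v)+count(v+1) over the distinct values v, correct because a set of ints with max-min < 2 holds only two adjacent values; no sort, no windows, no slices.
import Mathlib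
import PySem

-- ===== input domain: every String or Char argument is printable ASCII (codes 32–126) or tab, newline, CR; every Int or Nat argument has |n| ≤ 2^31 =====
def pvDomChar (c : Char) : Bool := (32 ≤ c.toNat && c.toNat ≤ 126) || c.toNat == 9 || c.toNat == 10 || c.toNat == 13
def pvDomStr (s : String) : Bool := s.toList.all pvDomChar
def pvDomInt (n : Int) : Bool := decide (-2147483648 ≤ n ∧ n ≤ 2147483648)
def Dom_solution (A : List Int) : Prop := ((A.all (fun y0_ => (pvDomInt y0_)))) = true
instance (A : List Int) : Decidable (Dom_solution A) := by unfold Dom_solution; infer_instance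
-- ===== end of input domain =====

-- B replaces A's sort + window scan over slices with pure value counting: a quasi-constant
-- (max-min < 2) multiset of ints only holds two adjacent values, so the answer is the largest
-- count(v) + count(v+1) over the distinct values v of the input.

-- ===== PORT A =====
-- get_amp: array[-1] - array[0]; the empty case is guarded by the if, so .getD 0 never hides an IndexError
def get_amp (a : List Int) : Int :=
  if a = [] then 0
  else (PySem.List.pyGet? a (-1)).getD 0 - (PySem.List.pyGet? a 0).getD 0

def isQuasi (a : List Int) : Bool := if get_amp a < 2 then true else false

-- A's while loop; Python recomputes the slice sorted_array[j:i] at each use, as written here.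
-- The Nat fuel only makes the recursion total: each loop step raises i + j by one and the
-- guard fails once i = len + 1, so the fuel passed at the call site is never exhausted
-- before the guard fails, and the result is exactly the Python loop's.
def aloop (s : List Int) : Nat → Int → Int → Int → Int
  | 0, _, _, L => L
  | fuel + 1, i, j, L =>
    if i < (s.length : Int) + 1 ∧ j ≤ i then
      if 1 ≤ i - j then
        if isQuasi (PySem.List.slice s (some j) (some i)) then
          aloop s fuel (i + 1) j
            (if ((PySem.List.slice s (some j) (some i)).length : Int) > L
             then ((PySem.List.slice s (some j) (some i)).length : Int) else L)
        else
          aloop s fuel i (j + 1) L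
      else
        aloop s fuel (i + 1) j L
    else L

def solution (A : List Int) : Int :=
  let s := PySem.List.sorted A (fun x => x) false
  if isQuasi s then (s.length : Int)
  else if s.length = 0 then 0
  else if s.length = 1 then 1
  else if s.length = 2 then
    (if isQuasi s then 2 else aloop s (2 * s.length + 1) 1 0 1)   -- the elif falls through to the loop when not quasi
  else aloop s (2 * s.length + 1) 1 0 1

-- ===== PORT B =====
-- 'counts[x] = counts.get(x, 0) + 1' over A, then one pass over counts.items()
def solution_alt (A : List Int) : Int :=
  let counts := A.foldl (fun d x => d.insert x (d.getD x 0 + 1)) PySem.Dict.empty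
  counts.items.foldl
    (fun best vc =>
      let t := vc.2 + counts.getD (vc.1 + 1) 0
      if t > best then t else best) 0

-- ===== PRECONDITION & SPEC =====
def Spec_solution (A : List Int) (out : Int) : Prop := out = solution_alt A
instance (A : List Int) (out : Int) : Decidable (Spec_solution A out) := by unfold Spec_solution; infer_instance

-- ===== CLAIM (what is proved, stated in full; the proofs are below) =====
def Claim_equal_solution : Prop := ∀ (A : List Int), Dom_solution A → Spec_solution A (solution A)

-- ===== LEMMAS AND PROOFS =====

-- A's two-pointer loop, restated as a sliding window (proof-side intermediate only):
-- 'advance' moves the left pointer while the window endpoints differ by ≥ 2,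
-- 'bgo' scans the right endpoint and keeps the running maximum window length.
def advance (s : List Int) : Nat → Int → Int → Int
  | 0, _, l => l
  | fuel + 1, r, l =>
    if l < r ∧ (PySem.List.pyGet? s r).getD 0 - (PySem.List.pyGet? s l).getD 0 ≥ 2 then
      advance s fuel r (l + 1)
    else l

def bgo (s : List Int) : Nat → Int → Int → Int → Int
  | 0, _, _, best => best
  | fuel + 1, r, l, best =>
    if r < (s.length : Int) then
      bgo s fuel (r + 1) (advance s (r - l).toNat r l)
        (if r - advance s (r - l).toNat r l + 1 > best
         then r - advance s (r - l).toNat r l + 1 else best)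
    else best

-- exact fuel A's loop needs from state (i, j): the loop measure
def FA (s : List Int) (i j : Int) : Nat := (2 * ((s.length : Int) + 1) - i - j).toNat

-- rank of a value: how many elements of s are < w
def blw (s : List Int) (w : Int) : Nat := s.countP (fun x => decide (x < w))

-- length of the maximal quasi window ending at index k of the sorted list s
def WfV (s : List Int) (k : Nat) : Int := (k : Int) + 1 - (blw s (s.getD k 0 - 1) : Int)

-- running maximum of WfV over indices k, k+1, …  (fuel = number of remaining indices)
def wfold (s : List Int) : Nat → Nat → Int → Int
  | 0, _, best => best
  | f + 1, k, best =>
    if k < s.length then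
      wfold s f (k + 1) (if WfV s k > best then WfV s k else best)
    else best

-- B's per-value score on the ORIGINAL list
def gA (A : List Int) (v : Int) : Int := (A.count v : Int) + (A.count (v + 1) : Int)

theorem isQuasi_true {a : List Int} (h : get_amp a < 2) : isQuasi a = true := by
  unfold isQuasi; rw [if_pos h]

theorem isQuasi_false {a : List Int} (h : ¬ get_amp a < 2) : isQuasi a = false := by
  unfold isQuasi; rw [if_neg h]

theorem get_amp_lt_of_isQuasi {a : List Int} (h : isQuasi a = true) : get_amp a < 2 := by
  by_contra hc; rw [isQuasi_false hc] at h; exact Bool.false_ne_true h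

theorem aloop_stop (s : List Int) (f : Nat) (i j L : Int)
    (h : ¬(i < (s.length : Int) + 1 ∧ j ≤ i)) : aloop s f i j L = L := by
  cases f with
  | zero => rfl
  | succ f => simp only [aloop, if_neg h]

theorem advance_bounds (s : List Int) (f : Nat) (r l : Int) (h : l ≤ r) :
    l ≤ advance s f r l ∧ advance s f r l ≤ r := by
  induction f generalizing l with
  | zero => exact ⟨le_refl l, h⟩
  | succ f ih =>
    simp only [advance]
    split_ifs with h'
    · have := ih (l + 1) (by omega)
      exact ⟨by omega, this.2⟩
    · exact ⟨le_refl l, h⟩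

theorem advance_step (s : List Int) (r l : Int) (hlt : l < r)
    (hc : (PySem.List.pyGet? s r).getD 0 - (PySem.List.pyGet? s l).getD 0 ≥ 2) :
    advance s (r - l).toNat r l = advance s (r - (l + 1)).toNat r (l + 1) := by
  have hf : (r - l).toNat = (r - (l + 1)).toNat + 1 := by omega
  rw [hf]; simp only [advance]; rw [if_pos ⟨hlt, hc⟩]

theorem advance_stop (s : List Int) (f : Nat) (r l : Int)
    (hc : ¬(l < r ∧ (PySem.List.pyGet? s r).getD 0 - (PySem.List.pyGet? s l).getD 0 ≥ 2)) :
    advance s f r l = l := by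
  cases f with
  | zero => rfl
  | succ f => simp only [advance]; rw [if_neg hc]

-- amplitude of the nonempty slice s[j:i] is s[i-1] - s[j]
theorem get_amp_slice (s : List Int) (j i : Int) (h0 : 0 ≤ j) (h1 : j < i)
    (h2 : i ≤ (s.length : Int)) :
    get_amp (PySem.List.slice s (some j) (some i)) =
      (PySem.List.pyGet? s (i - 1)).getD 0 - (PySem.List.pyGet? s j).getD 0 := by
  unfold get_amp
  rw [PySem.List.slice_toNat s (by omega) (by omega)]
  have hjn : j.toNat < s.length := by omega
  have hji : j.toNat < i.toNat := by omega
  set w := (s.drop j.toNat).take (i.toNat - j.toNat) with hw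
  have hwlen : w.length = i.toNat - j.toNat := by
    simp [hw, List.length_take, List.length_drop]; omega
  have hne : w ≠ [] := by
    intro hc; rw [hc] at hwlen; simp at hwlen; omega
  rw [if_neg hne]
  rw [PySem.List.pyGet?_neg_one, PySem.List.pyGet?_zero]
  have hhead : w[0]? = s[j.toNat]? := by
    simp [hw, List.getElem?_drop, hji]
  have hlast : w.getLast? = s[i.toNat - 1]? := by
    rw [List.getLast?_eq_getElem?, hwlen]
    simp [hw, List.getElem?_take, List.getElem?_drop]
    rw [if_pos (by omega)]
    congr 1; omega
  have e1 : PySem.List.pyGet? s (i - 1) = s[(i - 1).toNat]? :=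
    PySem.List.pyGet?_of_nonneg s (by omega : (0:Int) ≤ i - 1)
  have e2 : PySem.List.pyGet? s j = s[j.toNat]? :=
    PySem.List.pyGet?_of_nonneg s h0
  have e3 : (i - 1).toNat = i.toNat - 1 := by omega
  rw [hhead, hlast, e1, e2, e3]

theorem slice_len (s : List Int) (j i : Int) (h0 : 0 ≤ j) (h1 : j ≤ i)
    (h2 : i ≤ (s.length : Int)) :
    ((PySem.List.slice s (some j) (some i)).length : Int) = i - j := by
  rw [PySem.List.slice_toNat s (by omega) (by omega)]
  simp [List.length_take, List.length_drop]
  omega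

-- one right endpoint: A's de-extend/extend steps from (r+1, l) equal one 'advance'
theorem aloop_step (s : List Int) (r l L : Int) (h0 : 0 ≤ l) (hlr : l ≤ r)
    (hr : r < (s.length : Int)) :
    aloop s (FA s (r + 1) l) (r + 1) l L =
      aloop s (FA s (r + 2) (advance s (r - l).toNat r l)) (r + 2) (advance s (r - l).toNat r l)
        (if r - advance s (r - l).toNat r l + 1 > L
         then r - advance s (r - l).toNat r l + 1 else L) := by
  have hamp := get_amp_slice s l (r + 1) h0 (by omega) (by omega)
  rw [show r + 1 - 1 = r from by ring] at hamp
  have hFA : FA s (r + 1) l = FA s (r + 2) l + 1 := by unfold FA; omega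
  rw [hFA]
  simp only [aloop]
  rw [if_pos (⟨by omega, by omega⟩ : r + 1 < (s.length : Int) + 1 ∧ l ≤ r + 1),
      if_pos (by omega : (1:Int) ≤ r + 1 - l)]
  by_cases hq : (PySem.List.pyGet? s r).getD 0 - (PySem.List.pyGet? s l).getD 0 < 2
  · have hquasi : isQuasi (PySem.List.slice s (some l) (some (r + 1))) = true :=
      isQuasi_true (by rw [hamp]; exact hq)
    have hadv : advance s (r - l).toNat r l = l :=
      advance_stop s _ r l (by intro ⟨_, hc⟩; omega)
    rw [if_pos hquasi, hadv,
        slice_len s l (r + 1) h0 (by omega) (by omega),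
        show r + 1 + 1 = r + 2 from by ring,
        show r + 1 - l = r - l + 1 from by ring]
  · rw [not_lt] at hq
    have hlt : l < r := by
      rcases eq_or_lt_of_le hlr with heq | hlt
      · exfalso; rw [heq] at hq; omega
      · exact hlt
    have hquasi : isQuasi (PySem.List.slice s (some l) (some (r + 1))) = false :=
      isQuasi_false (by rw [hamp]; omega)
    have hadv := advance_step s r l hlt hq
    rw [if_neg (by simp [hquasi]), hadv,
        show FA s (r + 2) l = FA s (r + 1) (l + 1) from by unfold FA; omega]
    exact aloop_step s r (l + 1) L (by omega) (by omega) hr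
termination_by (r - l).toNat
decreasing_by omega

-- main invariant: the window scan from (r, l, best) equals A's loop from (r+1, l, best)
theorem bgo_eq_aloop (s : List Int) (r l best : Int) (h0 : 0 ≤ l) (hlr : l ≤ r)
    (hr : r ≤ (s.length : Int)) :
    bgo s ((s.length : Int) - r).toNat r l best = aloop s (FA s (r + 1) l) (r + 1) l best := by
  by_cases h : r < (s.length : Int)
  · have hfuel : ((s.length : Int) - r).toNat = ((s.length : Int) - (r + 1)).toNat + 1 := by omega
    rw [hfuel]
    simp only [bgo]
    rw [if_pos h, aloop_step s r l best h0 hlr h]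
    have hb := advance_bounds s (r - l).toNat r l hlr
    have ih := bgo_eq_aloop s (r + 1) (advance s (r - l).toNat r l)
      (if r - advance s (r - l).toNat r l + 1 > best
       then r - advance s (r - l).toNat r l + 1 else best) (by omega) (by omega) (by omega)
    rw [show r + 1 + 1 = r + 2 from by ring] at ih
    exact ih
  · have hfuel : ((s.length : Int) - r).toNat = 0 := by omega
    rw [hfuel]
    simp only [bgo]
    rw [aloop_stop s _ _ _ _ (by omega)]
termination_by ((s.length : Int) - r).toNat
decreasing_by omega

-- A seeds longest_length = 1; the size-1 first window makes the seed irrelevant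
theorem aloop_init (s : List Int) (h : s ≠ []) :
    aloop s (2 * s.length + 1) 1 0 0 = aloop s (2 * s.length + 1) 1 0 1 := by
  have hn : 0 < s.length := List.length_pos_iff.mpr h
  have hq : isQuasi (PySem.List.slice s (some 0) (some 1)) = true := by
    apply isQuasi_true
    rw [get_amp_slice s 0 1 (by omega) (by omega) (by omega)]
    norm_num
  have hlen := slice_len s 0 1 (by omega) (by omega) (by omega)
  have L0 : aloop s (2 * s.length + 1) 1 0 0 = aloop s (2 * s.length) 2 0 1 := by
    simp only [aloop]
    rw [if_pos (⟨by omega, by omega⟩ : (1:Int) < (s.length : Int) + 1 ∧ (0:Int) ≤ 1),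
        if_pos (by omega : (1:Int) ≤ 1 - 0), if_pos hq, hlen]
    norm_num
  have L1 : aloop s (2 * s.length + 1) 1 0 1 = aloop s (2 * s.length) 2 0 1 := by
    simp only [aloop]
    rw [if_pos (⟨by omega, by omega⟩ : (1:Int) < (s.length : Int) + 1 ∧ (0:Int) ≤ 1),
        if_pos (by omega : (1:Int) ≤ 1 - 0), if_pos hq, hlen]
    norm_num
  rw [L0, L1]

-- quasi case: sorted with amplitude < 2, so the left pointer never moves
theorem bgo_quasi (s : List Int) (hs : s.Pairwise (· ≤ ·)) (hq : get_amp s < 2)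
    (r best : Int) (h0 : 0 ≤ r) (hr : r < (s.length : Int)) :
    bgo s ((s.length : Int) - r).toNat r 0 best =
      if ((s.length : Int)) > best then (s.length : Int) else best := by
  have hne : s ≠ [] := by intro hc; rw [hc] at hr; simp at hr; omega
  have hnn : 0 < s.length := List.length_pos_iff.mpr hne
  have hqi := hq
  unfold get_amp at hqi
  rw [if_neg hne, PySem.List.pyGet?_neg_one, PySem.List.pyGet?_zero,
      List.getLast?_eq_getElem?] at hqi
  have key : ∀ k : Nat, k < s.length →
      (s[k]?).getD 0 - (s[0]?).getD 0 < 2 := by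
    intro k hk
    have hle : s[k]'hk ≤ s[s.length - 1]'(by omega) := by
      rcases Nat.lt_or_ge k (s.length - 1) with hlt | hge
      · exact List.pairwise_iff_getElem.mp hs k (s.length - 1) hk (by omega) hlt
      · have : k = s.length - 1 := by omega
        subst this; exact le_refl _
    rw [List.getElem?_eq_getElem hk, List.getElem?_eq_getElem hnn]
    rw [List.getElem?_eq_getElem (show s.length - 1 < s.length by omega),
        List.getElem?_eq_getElem hnn] at hqi
    simp only [Option.getD_some] at hqi ⊢
    omega
  have hadv : advance s (r - 0).toNat r 0 = 0 := by
    apply advance_stop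
    intro ⟨_, hc⟩
    rw [PySem.List.pyGet?_of_nonneg s h0, PySem.List.pyGet?_zero] at hc
    have := key r.toNat (by omega)
    omega
  have hfuel : ((s.length : Int) - r).toNat = ((s.length : Int) - (r + 1)).toNat + 1 := by omega
  rw [hfuel]
  simp only [bgo]
  rw [if_pos hr, hadv]
  by_cases hlast : r + 1 < (s.length : Int)
  · rw [bgo_quasi s hs hq (r + 1) _ (by omega) hlast]
    split_ifs <;> omega
  · have hz : ((s.length : Int) - (r + 1)).toNat = 0 := by omega
    rw [hz]
    simp only [bgo]
    split_ifs <;> omega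
termination_by ((s.length : Int) - r).toNat
decreasing_by omega

theorem get_amp_small (s : List Int) (h : s.length ≤ 1) : get_amp s = 0 := by
  match s, h with
  | [], _ => simp [get_amp]
  | [x], _ => simp [get_amp, PySem.List.pyGet?_neg_one]

-- sorted lists are index-monotone
theorem pw_mono {s : List Int} (hs : s.Pairwise (· ≤ ·)) {p q : Nat} (hpq : p ≤ q)
    (hq : q < s.length) : s[p]'(by omega) ≤ s[q] := by
  rcases Nat.lt_or_ge p q with h | h
  · exact List.pairwise_iff_getElem.mp hs p q (by omega) hq h
  · have hpq' : p = q := by omega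
    subst hpq'; exact le_refl _

-- the rank characterisation: in a sorted list, s[i] < w iff i < blw s w
theorem rank {s : List Int} (hs : s.Pairwise (· ≤ ·)) (w : Int) {i : Nat}
    (hi : i < s.length) : s[i] < w ↔ i < blw s w := by
  constructor
  · intro h
    have hall : ∀ a ∈ s.take (i + 1), (fun x => decide (x < w)) a = true := by
      intro a ha
      obtain ⟨j, hj, hja⟩ := List.mem_iff_getElem.mp ha
      have hjlen : j < s.length := by simp [List.length_take] at hj; omega
      have hji : j ≤ i := by simp [List.length_take] at hj; omega
      have ha' : a = s[j]'hjlen := by rw [← hja]; exact List.getElem_take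
      have hle : s[j]'hjlen ≤ s[i] := pw_mono hs hji hi
      simp only [ha', decide_eq_true_iff]
      omega
    have h1 : (s.take (i + 1)).countP (fun x => decide (x < w)) = (s.take (i + 1)).length :=
      List.countP_eq_length.mpr hall
    have h2 : (s.take (i + 1)).countP (fun x => decide (x < w)) ≤
        s.countP (fun x => decide (x < w)) :=
      List.Sublist.countP_le (List.take_sublist (i + 1) s)
    have h3 : (s.take (i + 1)).length = i + 1 := by simp [List.length_take]; omega
    unfold blw
    omega
  · intro h
    by_contra hge
    push_neg at hge
    have hall : ∀ a ∈ s.drop i, ¬ ((fun x => decide (x < w)) a = true) := by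
      intro a ha
      obtain ⟨j, hj, hja⟩ := List.mem_iff_getElem.mp ha
      have hjlen : i + j < s.length := by simp [List.length_drop] at hj; omega
      have ha' : a = s[i + j]'hjlen := by rw [← hja]; exact List.getElem_drop
      have hle : s[i] ≤ s[i + j]'hjlen := pw_mono hs (by omega) hjlen
      simp only [ha', decide_eq_true_iff]
      omega
    have h0 : (s.drop i).countP (fun x => decide (x < w)) = 0 :=
      List.countP_eq_zero.mpr hall
    have h1 : (s.take i).countP (fun x => decide (x < w)) +
        (s.drop i).countP (fun x => decide (x < w)) =
        s.countP (fun x => decide (x < w)) := by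
      rw [← List.countP_append, List.take_append_drop]
    have h2 : (s.take i).countP (fun x => decide (x < w)) ≤ (s.take i).length :=
      List.countP_le_length
    have h3 : (s.take i).length ≤ i := by simp [List.length_take]
    unfold blw at h
    omega

theorem blw_le_length (s : List Int) (w : Int) : blw s w ≤ s.length :=
  List.countP_le_length

theorem blw_mono (s : List Int) {w w' : Int} (h : w ≤ w') : blw s w ≤ blw s w' := by
  unfold blw
  exact List.countP_mono_left (by intro a _ ha; simp only [decide_eq_true_iff] at *; omega)

theorem blw_le_self {s : List Int} (hs : s.Pairwise (· ≤ ·)) {k : Nat}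
    (hk : k < s.length) : blw s (s[k] - 1) ≤ k := by
  by_contra hc
  push_neg at hc
  have := (rank hs (s[k] - 1) hk).mpr hc
  omega

-- a disjoint two-value countP is the sum of the two counts
theorem countP_pair (s : List Int) (a b : Int) (hab : a ≠ b) :
    s.countP (fun x => decide (x = a ∨ x = b)) = s.count a + s.count b := by
  induction s with
  | nil => simp
  | cons x t ih =>
    rw [List.countP_cons, List.count_cons, List.count_cons, ih]
    by_cases hxa : x = a
    · subst hxa
      simp [hab]
      try omega
    · by_cases hxb : x = b
      · subst hxb
        simp [hxa]
        try omega
      · simp [hxa, hxb]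
        try omega

theorem pyGetD0 (s : List Int) (i : Int) (h0 : 0 ≤ i) (h : i.toNat < s.length) :
    (PySem.List.pyGet? s i).getD 0 = s[i.toNat] := by
  rw [PySem.List.pyGet?_of_nonneg s h0, List.getElem?_eq_getElem h, Option.getD_some]

-- 'advance' computes the rank blw s (s[r]-1) whenever it starts at or below it
theorem advance_eq (s : List Int) (hs : s.Pairwise (· ≤ ·)) (r l : Int) (b : Nat)
    (hrt : r.toNat < s.length) (hr0 : 0 ≤ r) (h0 : 0 ≤ l)
    (hb : b = blw s (s[r.toNat] - 1)) (hmin : l ≤ (b : Int)) :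
    advance s (r - l).toNat r l = (b : Int) := by
  have hbr : (b : Int) ≤ r := by
    have := blw_le_self hs hrt
    omega
  rcases eq_or_lt_of_le hmin with heq | hlt
  · rw [← heq]
    apply advance_stop
    intro ⟨hlr', hge⟩
    have hlt' : l.toNat < s.length := by omega
    have hnot : ¬ (l.toNat < blw s (s[r.toNat] - 1)) := by omega
    have hge2 : ¬ (s[l.toNat] < s[r.toNat] - 1) :=
      fun hc => hnot ((rank hs (s[r.toNat] - 1) hlt').mp hc)
    rw [pyGetD0 s r hr0 hrt, pyGetD0 s l h0 hlt'] at hge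
    omega
  · have hlt' : l.toNat < s.length := by omega
    have hsl : s[l.toNat] < s[r.toNat] - 1 := by
      apply (rank hs (s[r.toNat] - 1) hlt').mpr
      omega
    have hstep := advance_step s r l (by omega)
      (by rw [pyGetD0 s r hr0 hrt, pyGetD0 s l h0 hlt']; omega)
    rw [hstep]
    exact advance_eq s hs r (l + 1) b hrt hr0 (by omega) hb (by omega)
termination_by ((b : Int) - l).toNat
decreasing_by omega

-- the window scan is the running maximum of WfV
theorem bgo_eq_wfold (s : List Int) (hs : s.Pairwise (· ≤ ·)) (r l best : Int)
    (h0 : 0 ≤ l) (hr0 : 0 ≤ r) (hlr : l ≤ r) (hrn : r ≤ (s.length : Int))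
    (hmin : ∀ _ : r.toNat < s.length, l ≤ (blw s (s.getD r.toNat 0 - 1) : Int)) :
    bgo s ((s.length : Int) - r).toNat r l best = wfold s (s.length - r.toNat) r.toNat best := by
  by_cases h : r < (s.length : Int)
  · have hrt : r.toNat < s.length := by omega
    have hfa : ((s.length : Int) - r).toNat = ((s.length : Int) - (r + 1)).toNat + 1 := by omega
    have hfw : s.length - r.toNat = (s.length - (r.toNat + 1)) + 1 := by omega
    rw [hfa, hfw]
    simp only [bgo, wfold]
    rw [if_pos h, if_pos hrt]
    have hmin' := hmin hrt
    rw [List.getD_eq_getElem s 0 hrt] at hmin'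
    have hadv : advance s (r - l).toNat r l = (blw s (s[r.toNat] - 1) : Int) :=
      advance_eq s hs r l _ hrt hr0 h0 rfl hmin'
    have hWf : WfV s r.toNat = r - (blw s (s[r.toNat] - 1) : Int) + 1 := by
      unfold WfV
      rw [List.getD_eq_getElem s 0 hrt]
      omega
    rw [hadv, ← hWf]
    have hble := blw_le_self hs hrt
    have ih := bgo_eq_wfold s hs (r + 1) ((blw s (s[r.toNat] - 1) : Nat) : Int)
      (if WfV s r.toNat > best then WfV s r.toNat else best)
      (by positivity) (by omega) (by omega) (by omega)
      (by
        intro h'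
        rw [List.getD_eq_getElem s 0 h']
        have h1 : r.toNat ≤ (r + 1).toNat := by omega
        have hmono : s[r.toNat] ≤ s[(r + 1).toNat] := pw_mono hs h1 h'
        have := blw_mono s (show s[r.toNat] - 1 ≤ s[(r + 1).toNat] - 1 by omega)
        omega)
    rw [show (r + 1).toNat = r.toNat + 1 from by omega] at ih
    exact ih
  · have h1 : ((s.length : Int) - r).toNat = 0 := by omega
    have h2 : s.length - r.toNat = 0 := by omega
    rw [h1, h2]
    simp only [bgo, wfold]
termination_by ((s.length : Int) - r).toNat
decreasing_by omega

theorem wfold_ge (s : List Int) (f k : Nat) (best : Int) : best ≤ wfold s f k best := by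
  induction f generalizing k best with
  | zero => exact le_refl best
  | succ f ih =>
    simp only [wfold]
    by_cases h : k < s.length
    · rw [if_pos h]
      have h1 : best ≤ (if WfV s k > best then WfV s k else best) := by split_ifs <;> omega
      exact le_trans h1 (ih (k + 1) _)
    · rw [if_neg h]

theorem wfold_mem_le (s : List Int) (f k j : Nat) (best : Int) (hkj : k ≤ j)
    (hj : j < s.length) (hf : s.length ≤ k + f) : WfV s j ≤ wfold s f k best := by
  induction f generalizing k best with
  | zero => exact absurd hj (by omega)
  | succ f ih =>
    simp only [wfold]
    rw [if_pos (by omega : k < s.length)]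
    rcases eq_or_lt_of_le hkj with heq | hlt
    · subst heq
      have h1 : WfV s k ≤ (if WfV s k > best then WfV s k else best) := by
        split_ifs <;> omega
      exact le_trans h1 (wfold_ge s f (k + 1) _)
    · exact ih (k + 1) _ (by omega) (by omega)

theorem wfold_le (s : List Int) (f k : Nat) (best M : Int) (hb : best ≤ M)
    (hall : ∀ j, k ≤ j → j < s.length → WfV s j ≤ M) : wfold s f k best ≤ M := by
  induction f generalizing k best with
  | zero => exact hb
  | succ f ih =>
    simp only [wfold]
    by_cases h : k < s.length
    · rw [if_pos h]
      refine ih (k + 1) _ ?_ (fun j hj hjl => hall j (by omega) hjl)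
      have := hall k (le_refl k) h
      split_ifs <;> omega
    · rw [if_neg h]; exact hb

-- running maximum of g over a list (B's second pass)
theorem mfold_ge (g : Int → Int) (L : List Int) :
    ∀ best : Int, best ≤ L.foldl (fun b v => if g v > b then g v else b) best := by
  induction L with
  | nil => intro best; exact le_refl best
  | cons x t ih =>
    intro best
    simp only [List.foldl_cons]
    have h1 : best ≤ (if g x > best then g x else best) := by split_ifs <;> omega
    exact le_trans h1 (ih _)

theorem mfold_mem (g : Int → Int) (L : List Int) :
    ∀ (best v : Int), v ∈ L →
      g v ≤ L.foldl (fun b v => if g v > b then g v else b) best := by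
  induction L with
  | nil => intro best v hv; simp at hv
  | cons x t ih =>
    intro best v hv
    simp only [List.foldl_cons]
    rcases List.mem_cons.mp hv with heq | hmem
    · subst heq
      have h1 : g v ≤ (if g v > best then g v else best) := by split_ifs <;> omega
      exact le_trans h1 (mfold_ge g t _)
    · exact ih _ v hmem

theorem mfold_le (g : Int → Int) (L : List Int) (M : Int) :
    ∀ best : Int, best ≤ M → (∀ v ∈ L, g v ≤ M) →
      L.foldl (fun b v => if g v > b then g v else b) best ≤ M := by
  induction L with
  | nil => intro best hb _; exact hb
  | cons x t ih =>
    intro best hb hall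
    simp only [List.foldl_cons]
    refine ih _ ?_ (fun v hv => hall v (List.mem_cons_of_mem x hv))
    have := hall x List.mem_cons_self
    split_ifs <;> omega

-- every window ending at k holds only the values s[k]-1 and s[k]
theorem window_le_counts (s : List Int) (hs : s.Pairwise (· ≤ ·)) (k : Nat)
    (hk : k < s.length) :
    (k : Int) + 1 - (blw s (s[k] - 1) : Int) ≤
      (s.count (s[k] - 1) : Int) + (s.count s[k] : Int) := by
  have hbk : blw s (s[k] - 1) ≤ k := blw_le_self hs hk
  set b := blw s (s[k] - 1) with hbdef
  have hmid : ∀ a ∈ (s.take (k + 1)).drop b,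
      (fun x => decide (x = s[k] - 1 ∨ x = s[k])) a = true := by
    intro a ha
    obtain ⟨j, hj, hja⟩ := List.mem_iff_getElem.mp ha
    have hlen1 : (s.take (k + 1)).length = k + 1 := by simp [List.length_take]; omega
    have hj' : b + j < (s.take (k + 1)).length := by
      simp [List.length_drop] at hj; omega
    have hidx : b + j < s.length := by omega
    have ha1 : a = (s.take (k + 1))[b + j]'hj' := by rw [← hja]; exact List.getElem_drop
    have ha2 : (s.take (k + 1))[b + j]'hj' = s[b + j]'hidx := List.getElem_take
    have hge : ¬ (s[b + j]'hidx < s[k] - 1) := by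
      intro hc
      have := (rank hs (s[k] - 1) hidx).mp hc
      omega
    have hle : s[b + j]'hidx ≤ s[k] := pw_mono hs (by omega) hk
    simp only [ha1, ha2, decide_eq_true_iff]
    omega
  have h1 : ((s.take (k + 1)).drop b).countP (fun x => decide (x = s[k] - 1 ∨ x = s[k])) =
      ((s.take (k + 1)).drop b).length := List.countP_eq_length.mpr hmid
  have h2 : ((s.take (k + 1)).drop b).countP (fun x => decide (x = s[k] - 1 ∨ x = s[k])) ≤
      s.countP (fun x => decide (x = s[k] - 1 ∨ x = s[k])) :=
    List.Sublist.countP_le (List.Sublist.trans (List.drop_sublist b _) (List.take_sublist (k + 1) s))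
  have h3 : ((s.take (k + 1)).drop b).length = k + 1 - b := by
    simp [List.length_drop, List.length_take]; omega
  have h4 := countP_pair s (s[k] - 1) s[k] (by omega)
  omega

-- the windows reach the score of every value v of s
theorem counts_le_window (s : List Int) (hs : s.Pairwise (· ≤ ·)) (v : Int) (hv : v ∈ s) :
    ∃ k, k < s.length ∧ (s.count v : Int) + (s.count (v + 1) : Int) ≤ WfV s k := by
  obtain ⟨iv, hiv, hivv⟩ := List.mem_iff_getElem.mp hv
  have hivB : iv < blw s (v + 2) := (rank hs (v + 2) hiv).mp (by omega)
  have hB2len : blw s (v + 2) ≤ s.length := blw_le_length s (v + 2)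
  set k := blw s (v + 2) - 1 with hkdef
  have hk : k < s.length := by omega
  refine ⟨k, hk, ?_⟩
  have hskv2 : s[k] < v + 2 := (rank hs (v + 2) hk).mpr (by omega)
  have hvk : v ≤ s[k] := by
    have := pw_mono hs (show iv ≤ k by omega) hk
    omega
  have hbk : blw s (s[k] - 1) ≤ k := blw_le_self hs hk
  set b := blw s (s[k] - 1) with hbdef
  set p : Int → Bool := fun x => decide (x = v ∨ x = v + 1) with hp
  have hsplit : s.countP p = (s.take (k + 1)).countP p + (s.drop (k + 1)).countP p := by
    rw [← List.countP_append, List.take_append_drop]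
  have htb : (s.take (k + 1)).take b = s.take b := by
    rw [List.take_take]; congr 1; omega
  have hsplit2 : (s.take (k + 1)).countP p =
      (s.take b).countP p + ((s.take (k + 1)).drop b).countP p := by
    rw [← htb, ← List.countP_append, List.take_append_drop]
  have hpre : (s.take b).countP p = 0 := by
    apply List.countP_eq_zero.mpr
    intro a ha
    obtain ⟨j, hj, hja⟩ := List.mem_iff_getElem.mp ha
    have hjb : j < b := by simp [List.length_take] at hj; omega
    have hjlen : j < s.length := by omega
    have ha' : a = s[j]'hjlen := by rw [← hja]; exact List.getElem_take
    have hlt : s[j]'hjlen < s[k] - 1 := (rank hs (s[k] - 1) hjlen).mpr hjb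
    simp only [ha', hp, decide_eq_true_iff]
    omega
  have hsuf : (s.drop (k + 1)).countP p = 0 := by
    apply List.countP_eq_zero.mpr
    intro a ha
    obtain ⟨j, hj, hja⟩ := List.mem_iff_getElem.mp ha
    have hjlen : k + 1 + j < s.length := by simp [List.length_drop] at hj; omega
    have ha' : a = s[k + 1 + j]'hjlen := by rw [← hja]; exact List.getElem_drop
    have hge : ¬ (s[k + 1 + j]'hjlen < v + 2) := by
      intro hc
      have := (rank hs (v + 2) hjlen).mp hc
      omega
    simp only [ha', hp, decide_eq_true_iff]
    omega
  have hmidlen : ((s.take (k + 1)).drop b).countP p ≤ k + 1 - b := by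
    have h1 : ((s.take (k + 1)).drop b).countP p ≤ ((s.take (k + 1)).drop b).length :=
      List.countP_le_length
    have h2 : ((s.take (k + 1)).drop b).length = k + 1 - b := by
      simp [List.length_drop, List.length_take]; omega
    omega
  have h4 : s.countP p = s.count v + s.count (v + 1) := countP_pair s v (v + 1) (by omega)
  have hWf : WfV s k = (k : Int) + 1 - (b : Int) := by
    unfold WfV
    rw [List.getD_eq_getElem s 0 hk, ← hbdef]
  rw [hWf]
  omega

-- B's port, rewritten as a fold of gA over the distinct values of A
theorem alt_eq_M (A : List Int) :
    solution_alt A =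
      (PySem.List.dedup A).foldl (fun b v => if gA A v > b then gA A v else b) 0 := by
  simp only [solution_alt]
  rw [PySem.Dict.foldl_insert_getD_add_one_eq_counter, PySem.Dict.items_counter,
      List.foldl_map, PySem.List.dedup_eq_ofList]
  simp only [PySem.Dict.getD_counter, gA]

-- the window maximum over the sorted list equals B's counting maximum
theorem bgo_eq_alt (A : List Int) :
    bgo (PySem.List.sorted A (fun x => x) false)
      (PySem.List.sorted A (fun x => x) false).length 0 0 0 = solution_alt A := by
  set s := PySem.List.sorted A (fun x => x) false with hsdef
  have hsp : s.Pairwise (· ≤ ·) := PySem.List.sorted_pairwise A (fun x => x)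
  have hperm : s.Perm A := PySem.List.sorted_perm A (fun x => x) false
  have hcount : ∀ v, s.count v = A.count v := fun v => hperm.count_eq v
  have hW : bgo s s.length 0 0 0 = wfold s s.length 0 0 := by
    have h := bgo_eq_wfold s hsp 0 0 0 (le_refl 0) (le_refl 0) (le_refl 0)
      (by omega) (by intro _; positivity)
    simpa using h
  rw [hW, alt_eq_M A]
  apply le_antisymm
  · apply wfold_le s s.length 0 0 _ (mfold_ge (gA A) (PySem.List.dedup A) 0)
    intro j hj0 hjl
    have hwc := window_le_counts s hsp j hjl
    have hWf : WfV s j = (j : Int) + 1 - (blw s (s[j] - 1) : Int) := by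
      unfold WfV; rw [List.getD_eq_getElem s 0 hjl]
    by_cases hpos : 0 < s.count (s[j] - 1)
    · have hmemA : (s[j] - 1) ∈ A := by
        rw [← List.count_pos_iff, ← hcount]; exact hpos
      have hded : (s[j] - 1) ∈ PySem.List.dedup A := (PySem.List.mem_dedup A _).mpr hmemA
      have hM := mfold_mem (gA A) (PySem.List.dedup A) 0 (s[j] - 1) hded
      have hg : gA A (s[j] - 1) = (s.count (s[j] - 1) : Int) + (s.count s[j] : Int) := by
        unfold gA
        rw [show s[j] - 1 + 1 = s[j] from by ring, ← hcount, ← hcount]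
      omega
    · have hz : s.count (s[j] - 1) = 0 := by omega
      have hmemA : s[j] ∈ A := by
        rw [← List.count_pos_iff, ← hcount, List.count_pos_iff]
        exact List.getElem_mem hjl
      have hded : s[j] ∈ PySem.List.dedup A := (PySem.List.mem_dedup A _).mpr hmemA
      have hM := mfold_mem (gA A) (PySem.List.dedup A) 0 s[j] hded
      have hg : gA A s[j] = (s.count s[j] : Int) + (s.count (s[j] + 1) : Int) := by
        unfold gA
        rw [← hcount, ← hcount]
      have hnn : (0 : Int) ≤ (s.count (s[j] + 1) : Int) := by positivity
      omega
  · refine mfold_le (gA A) (PySem.List.dedup A) _ 0 (wfold_ge s s.length 0 0) ?_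
    intro v hv
    have hvA : v ∈ A := (PySem.List.mem_dedup A v).mp hv
    have hvs : v ∈ s := by rw [hsdef, PySem.List.mem_sorted]; exact hvA
    obtain ⟨k, hk, hle⟩ := counts_le_window s hsp v hvs
    have hwf := wfold_mem_le s s.length 0 k 0 (Nat.zero_le k) hk (by omega)
    have hg : gA A v = (s.count v : Int) + (s.count (v + 1) : Int) := by
      unfold gA; rw [← hcount, ← hcount]
    omega

-- ===== VERDICT (by name: the statement is the Claim_ definition above) =====
theorem solution_spec : Claim_equal_solution := by
  intro A _
  unfold Spec_solution solution
  by_cases hA : A = []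
  · subst hA; decide
  set s := PySem.List.sorted A (fun x => x) false with hsdef
  have hsp : s.Pairwise (· ≤ ·) := PySem.List.sorted_pairwise A (fun x => x)
  have hne : s ≠ [] := by
    intro hc
    exact hA ((PySem.List.sorted_eq_nil_iff A (fun x => x) false).mp (hsdef ▸ hc))
  have hn0 : s.length ≠ 0 := fun hc => hne (List.length_eq_zero_iff.mp hc)
  have hf : ((s.length : Int) - 0).toNat = s.length := by omega
  have halt := bgo_eq_alt A
  rw [← hsdef] at halt
  simp only []
  by_cases hq : isQuasi s = true
  · rw [if_pos hq]
    rw [← halt]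
    conv_rhs => rw [← hf]
    rw [bgo_quasi s hsp (get_amp_lt_of_isQuasi hq) 0 0 (le_refl 0) (by omega),
        if_pos (by omega)]
  · rw [if_neg hq]
    have hq2 : ¬ get_amp s < 2 := fun hc => hq (isQuasi_true hc)
    have hn2 : s.length ≠ 1 := by
      intro hc; exact hq2 (by rw [get_amp_small s (by omega)]; omega)
    have hloop : aloop s (2 * s.length + 1) 1 0 1 = bgo s s.length 0 0 0 := by
      conv_rhs => rw [← hf]
      rw [bgo_eq_aloop s 0 0 0 (le_refl 0) (le_refl 0) (by omega),
          show (0:Int) + 1 = 1 from by norm_num,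
          show FA s 1 0 = 2 * s.length + 1 from by unfold FA; omega,
          aloop_init s hne]
    rw [if_neg hn0, if_neg hn2]
    by_cases hn2' : s.length = 2
    · rw [if_pos hn2', if_neg (by simp [hq])]
      rw [hloop, halt]
    · rw [if_neg hn2']
      rw [hloop, halt]
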